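-- pv_equiv track=rewrite | github.com/AdamZhouSE/pythonHomework | Code/CodeRecords/2398/60678/291369.py | calcuateTime
-- ===== SOURCE A (Python) =====
-- def calcuateTime(prepares, k):
--     state = []
--     for i in range(k):
--         state.append(prepares[0])
--         prepares.pop(0)
--     while prepares != []:
--         state.sort()
--         state[0] += prepares.pop(0)
--     state.sort(reverse=True)
--     return state[0]
-- ===== SOURCE B (Python) =====
-- def _insort(xs, x):
--     lo, hi = 0, len(xs)
--     while lo < hi:
--         mid = (lo + hi) // 2
--         if xs[mid] <= x:
--             lo = mid + 1
--         else:
--             hi = mid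
--     xs.insert(lo, x)
--
--
-- def calcuateTime(prepares, k):
--     loads = []
--     for job in prepares[:k]:
--         _insort(loads, job)
--     for job in prepares[k:]:
--         _insort(loads, loads.pop(0) + job)
--     return loads[-1]
-- ===== Notes on version B (the rewrite author's own statement) =====
-- stated objective: faster
-- what changed: B keeps the machine-load list sorted the whole time (binary-search the insertion point, pop the head as the minimum, insert the updated load in place) instead of re-sorting the whole list before every job, popping each job off the front of the input, and reverse-sorting at the end; the answer is the last element of the sorted list.
import Mathlib
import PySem

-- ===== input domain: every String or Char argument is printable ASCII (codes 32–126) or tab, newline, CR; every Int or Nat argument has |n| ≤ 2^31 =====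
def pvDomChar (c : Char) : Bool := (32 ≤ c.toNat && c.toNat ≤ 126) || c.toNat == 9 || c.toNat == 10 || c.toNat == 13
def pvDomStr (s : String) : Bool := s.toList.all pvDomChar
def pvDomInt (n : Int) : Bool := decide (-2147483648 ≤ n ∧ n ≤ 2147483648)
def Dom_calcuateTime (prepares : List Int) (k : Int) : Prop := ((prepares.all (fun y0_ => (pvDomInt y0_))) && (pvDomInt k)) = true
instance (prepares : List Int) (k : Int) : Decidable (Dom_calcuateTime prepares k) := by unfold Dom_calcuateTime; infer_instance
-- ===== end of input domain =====

-- B keeps the load list sorted (binary-search insertion of the updated minimum) instead of re-sorting it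
-- before every job — measured faster in a timing run; the equivalence is about the RETURN value only
-- (A empties `prepares` in place, B does not mutate its arguments).

-- ===== PORT A =====
-- 'for i in range(k): state.append(prepares[0]); prepares.pop(0)' — fuel = number of iterations
def aInit : Nat → List Int → List Int → Option (List Int × List Int)
  | 0, state, prepares => some (state, prepares)
  | n + 1, state, prepares =>
    match PySem.List.pop? prepares 0 with
    | none => none                 -- prepares[0] raises IndexError
    | some (p, rest) => aInit n (state ++ [p]) rest

-- 'while prepares != []: state.sort(); state[0] += prepares.pop(0)'
def aWhile : List Int → List Int → Option (List Int)
  | state, [] => some state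
  | state, p :: rest =>
    match PySem.List.sorted state (fun x => x) false with
    | [] => none                   -- state[0] raises IndexError
    | m :: t => aWhile ((m + p) :: t) rest

def calcuateTime (prepares : List Int) (k : Int) : Int :=
  match aInit k.toNat [] prepares with
  | none => 0
  | some (state, rest) =>
    match aWhile state rest with
    | none => 0
    | some st =>
      match PySem.List.sorted st (fun x => x) true with  -- state.sort(reverse=True)
      | [] => 0                    -- state[0] raises IndexError
      | m :: _ => m                -- return state[0]

-- ===== PORT B =====
-- _insert: binary search for the insertion point (first index whose element is > x) …
def insPos (x : Int) (xs : List Int) (lo hi : Nat) : Nat :=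
  if h : lo < hi then
    -- mid = (lo + hi) // 2
    if PySem.List.pyGetD xs (((lo + hi) / 2 : Nat) : Int) 0 ≤ x then
      insPos x xs ((lo + hi) / 2 + 1) hi
    else
      insPos x xs lo ((lo + hi) / 2)
  else lo
termination_by hi - lo
decreasing_by all_goals omega

-- … then 'xs.insert(lo, x)'
def insertB (x : Int) (xs : List Int) : List Int :=
  PySem.List.insert xs ((insPos x xs 0 xs.length : Nat) : Int) x

def calcuateTime_alt (prepares : List Int) (k : Int) : Int :=
  PySem.List.pyGetD
    ((PySem.List.slice prepares (some k) none).foldl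
      (fun l j => match l with
        | [] => []                 -- loads[0] raises IndexError; outside Pre_
        | m :: t => insertB (m + j) t)
      ((PySem.List.slice prepares none (some k)).foldl (fun l j => insertB j l) []))
    (-1) 0                         -- loads[-1]

-- ===== PRECONDITION & SPEC =====
-- A raises IndexError unless 1 ≤ k ≤ len(prepares) (pop(0)/state[0] on an empty list)
def Pre_calcuateTime (prepares : List Int) (k : Int) : Prop :=
  1 ≤ k ∧ k ≤ (prepares.length : Int)
instance (prepares : List Int) (k : Int) : Decidable (Pre_calcuateTime prepares k) := by
  unfold Pre_calcuateTime; infer_instance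

def pvWitness_calcuateTime : List Int × Int := ([3, 1, 2], 2)

def Spec_calcuateTime (prepares : List Int) (k : Int) (out : Int) : Prop := out = calcuateTime_alt prepares k
instance (prepares : List Int) (k : Int) (out : Int) : Decidable (Spec_calcuateTime prepares k out) := by unfold Spec_calcuateTime; infer_instance

-- ===== CLAIM (what is proved, stated in full; the proofs are below) =====
def Claim_equal_calcuateTime : Prop := ∀ (prepares : List Int) (k : Int), Dom_calcuateTime prepares k → Pre_calcuateTime prepares k → Spec_calcuateTime prepares k (calcuateTime prepares k)

-- ===== LEMMAS AND PROOFS =====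

-- proof-side description of ordered insertion (linear scan); insertB is shown equal to it on sorted lists
def insB (x : Int) : List Int → List Int
  | [] => [x]
  | y :: ys => if y ≤ x then y :: insB x ys else x :: y :: ys

theorem insPos_spec (x : Int) (xs : List Int) (hsorted : xs.Pairwise (· ≤ ·)) :
    ∀ (n lo hi : Nat), hi - lo ≤ n → hi ≤ xs.length → lo ≤ hi →
    (∀ i, i < lo → (h : i < xs.length) → xs[i] ≤ x) →
    (∀ i, hi ≤ i → (h : i < xs.length) → x < xs[i]) →
    insPos x xs lo hi ≤ xs.length ∧
      (∀ i, i < insPos x xs lo hi → (h : i < xs.length) → xs[i] ≤ x) ∧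
      (∀ i, insPos x xs lo hi ≤ i → (h : i < xs.length) → x < xs[i]) := by
  intro n
  induction n with
  | zero =>
    intro lo hi hn hhi hlo hlow hhigh
    have hnl : ¬ lo < hi := by omega
    rw [insPos, dif_neg hnl]
    exact ⟨by omega, fun i h1 h2 => hlow i (by omega) h2, fun i h1 h2 => hhigh i (by omega) h2⟩
  | succ n ih =>
    intro lo hi hn hhi hlo hlow hhigh
    by_cases h : lo < hi
    · rw [insPos, dif_pos h]
      have hmlt : (lo + hi) / 2 < xs.length := by omega
      split_ifs with hle
      · refine ih ((lo + hi) / 2 + 1) hi (by omega) hhi (by omega) ?_ hhigh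
        intro i hi' h'
        have hm : xs[(lo + hi) / 2] ≤ x := by
          rw [PySem.List.pyGetD_natCast, List.getD_eq_getElem xs 0 hmlt] at hle
          exact hle
        rcases Nat.lt_or_ge i ((lo + hi) / 2) with h'' | h''
        · exact le_trans (List.pairwise_iff_getElem.mp hsorted i _ h' hmlt h'') hm
        · have hieq : i = (lo + hi) / 2 := by omega
          subst hieq; exact hm
      · refine ih lo ((lo + hi) / 2) (by omega) (by omega) (by omega) hlow ?_
        intro i hi' h'
        have hm : x < xs[(lo + hi) / 2] := by
          rw [PySem.List.pyGetD_natCast, List.getD_eq_getElem xs 0 hmlt] at hle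
          omega
        rcases Nat.lt_or_ge ((lo + hi) / 2) i with h'' | h''
        · exact lt_of_lt_of_le hm (List.pairwise_iff_getElem.mp hsorted _ i hmlt h' h'')
        · have hieq : i = (lo + hi) / 2 := by omega
          subst hieq; exact hm
    · rw [insPos, dif_neg h]
      exact ⟨by omega, fun i h1 h2 => hlow i (by omega) h2, fun i h1 h2 => hhigh i (by omega) h2⟩

theorem insB_eq_splice (x : Int) (xs : List Int) (p : Nat) (hp : p ≤ xs.length)
    (hlow : ∀ i, i < p → (h : i < xs.length) → xs[i] ≤ x)
    (hhigh : ∀ i, p ≤ i → (h : i < xs.length) → x < xs[i]) :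
    xs.take p ++ [x] ++ xs.drop p = insB x xs := by
  induction xs generalizing p with
  | nil =>
    have hp0 : p = 0 := by simpa using hp
    subst hp0; simp [insB]
  | cons y ys ih =>
    cases p with
    | zero =>
      have hxy : x < y := hhigh 0 (by omega) (by simp)
      simp [insB, not_le.mpr hxy]
    | succ q =>
      have hy : y ≤ x := hlow 0 (by omega) (by simp)
      have ihq := ih q (by simpa using hp)
        (fun i hi h => by simpa using hlow (i + 1) (by omega) (by simpa using h))
        (fun i hi h => by simpa using hhigh (i + 1) (by omega) (by simpa using h))
      simp only [List.take_succ_cons, List.drop_succ_cons, insB, if_pos hy]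
      rw [← ihq]
      simp

-- xs.insert(p, x) at an in-range nonnegative position is the splice take/drop form
theorem insert_natCast_eq (xs : List Int) (p : Nat) (x : Int) (hp : p ≤ xs.length) :
    PySem.List.insert xs (p : Int) x = xs.take p ++ [x] ++ xs.drop p := by
  have h1 : ((p : Int) < 0) = False := by simp
  have h2 : min (p : Int) (xs.length : Int) = (p : Int) := by omega
  simp [PySem.List.insert, PySem.List.sliceIndices, h1, h2]

theorem insertB_eq_insB (x : Int) (xs : List Int) (hsorted : xs.Pairwise (· ≤ ·)) :
    insertB x xs = insB x xs := by
  obtain ⟨h1, h2, h3⟩ := insPos_spec x xs hsorted xs.length 0 xs.length (by omega) le_rfl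
    (by omega) (fun i hi h => by omega) (fun i hi h => absurd h (by omega))
  unfold insertB
  rw [insert_natCast_eq xs _ x h1]
  exact insB_eq_splice x xs _ h1 h2 h3

theorem insB_perm (x : Int) (l : List Int) : (insB x l).Perm (x :: l) := by
  induction l with
  | nil => simp [insB]
  | cons y ys ih =>
    simp only [insB]
    split
    · exact ((ih.cons y).trans (List.Perm.swap x y ys))
    · exact List.Perm.refl _

theorem insB_pairwise (x : Int) (l : List Int) (h : l.Pairwise (· ≤ ·)) :
    (insB x l).Pairwise (· ≤ ·) := by
  induction l with
  | nil => simp [insB]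
  | cons y ys ih =>
    rcases List.pairwise_cons.mp h with ⟨hy, hys⟩
    simp only [insB]
    split
    · rename_i hyx
      refine List.pairwise_cons.mpr ⟨?_, ih hys⟩
      intro a ha
      rcases List.mem_cons.mp ((insB_perm x ys).mem_iff.mp ha) with h' | h'
      · exact h' ▸ hyx
      · exact hy a h'
    · rename_i hyx
      refine List.pairwise_cons.mpr ⟨?_, h⟩
      intro a ha
      rcases List.mem_cons.mp ha with h' | h'
      · omega
      · exact le_of_lt (lt_of_lt_of_le (by omega) (List.rel_of_pairwise_cons h h'))

theorem foldl_insertB_eq (xs : List Int) : ∀ acc : List Int, acc.Pairwise (· ≤ ·) →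
    xs.foldl (fun l j => insertB j l) acc = xs.foldl (fun l j => insB j l) acc := by
  induction xs with
  | nil => intro acc _; rfl
  | cons x xs ih =>
    intro acc hacc
    simp only [List.foldl_cons]
    rw [insertB_eq_insB x acc hacc]
    exact ih _ (insB_pairwise x acc hacc)

theorem foldl_step_insertB_eq (xs : List Int) : ∀ acc : List Int, acc.Pairwise (· ≤ ·) →
    xs.foldl (fun l j => match l with | [] => ([] : List Int) | m :: t => insertB (m + j) t) acc =
      xs.foldl (fun l j => match l with | [] => ([] : List Int) | m :: t => insB (m + j) t) acc := by
  induction xs with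
  | nil => intro acc _; rfl
  | cons x xs ih =>
    intro acc hacc
    simp only [List.foldl_cons]
    cases acc with
    | nil => exact ih [] (by simp)
    | cons m t =>
      have ht := (List.pairwise_cons.mp hacc).2
      show xs.foldl _ (insertB (m + x) t) = xs.foldl _ (insB (m + x) t)
      rw [insertB_eq_insB _ _ ht]
      exact ih _ (insB_pairwise _ _ ht)

theorem insFold_perm (xs acc : List Int) :
    (xs.foldl (fun l j => insB j l) acc).Perm (acc ++ xs) := by
  induction xs generalizing acc with
  | nil => simp
  | cons x xs ih =>
    simp only [List.foldl_cons]
    refine (ih (insB x acc)).trans ?_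
    refine (List.Perm.append_right xs (insB_perm x acc)).trans ?_
    simpa using (List.perm_middle (a := x) (l₁ := acc) (l₂ := xs)).symm

theorem insFold_pairwise (xs acc : List Int) (h : acc.Pairwise (· ≤ ·)) :
    (xs.foldl (fun l j => insB j l) acc).Pairwise (· ≤ ·) := by
  induction xs generalizing acc with
  | nil => simpa
  | cons x xs ih => exact ih _ (insB_pairwise x acc h)

theorem aInit_eq (n : Nat) (state xs : List Int) (h : n ≤ xs.length) :
    aInit n state xs = some (state ++ xs.take n, xs.drop n) := by
  induction n generalizing state xs with
  | zero => simp [aInit]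
  | succ m ih =>
    cases xs with
    | nil => simp at h
    | cons x xs =>
      simp only [aInit, PySem.List.pop?_zero_cons]
      rw [ih (state ++ [x]) xs (by simpa using h)]
      simp

-- the core invariant: A's while loop with a sorted permutation on B's side
theorem main_loop (rest : List Int) (state loads : List Int)
    (hne : state ≠ []) (hperm : loads.Perm state) (hsorted : loads.Pairwise (· ≤ ·)) :
    ∃ st loads', aWhile state rest = some st ∧
      rest.foldl (fun l j => match l with
        | [] => ([] : List Int)
        | m :: t => insB (m + j) t) loads = loads' ∧
      loads'.Perm st ∧ loads'.Pairwise (· ≤ ·) ∧ loads' ≠ [] := by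
  induction rest generalizing state loads with
  | nil =>
    refine ⟨state, loads, rfl, rfl, hperm, hsorted, fun h => hne ?_⟩
    have := hperm.symm
    rw [h] at this
    exact this.eq_nil
  | cons p rest ih =>
    have hsort_eq : PySem.List.sorted state (fun x => x) false = loads :=
      PySem.List.sorted_id_eq_of_perm_of_pairwise state loads hperm hsorted
    cases loads with
    | nil => exact absurd hperm.symm.eq_nil hne
    | cons m t =>
      have hperm' : (insB (m + p) t).Perm ((m + p) :: t) := insB_perm _ _
      have hsorted' : (insB (m + p) t).Pairwise (· ≤ ·) :=
        insB_pairwise _ _ (List.pairwise_cons.mp hsorted).2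
      obtain ⟨st, loads', h1, h2, h3, h4, h5⟩ :=
        ih ((m + p) :: t) (insB (m + p) t) (by simp) hperm' hsorted'
      refine ⟨st, loads', ?_, ?_, h3, h4, h5⟩
      · simp only [aWhile, hsort_eq]; exact h1
      · simpa using h2

-- last of a ≤-sorted list bounds every element
theorem getLast_max (l : List Int) (h : l.Pairwise (· ≤ ·)) (hne : l ≠ []) :
    ∀ y ∈ l, y ≤ l.getLast hne := by
  intro y hy
  have hlast : l.getLast hne = l[l.length - 1]'(by
      cases l with | nil => simp at hne | cons a t => simp) := List.getLast_eq_getElem hne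
  obtain ⟨i, hi, rfl⟩ := List.mem_iff_getElem.mp hy
  rw [hlast]
  rcases Nat.lt_or_ge i (l.length - 1) with h' | h'
  · exact List.pairwise_iff_getElem.mp h i (l.length - 1) hi (by omega) h'
  · have : i = l.length - 1 := by omega
    simp [this]

-- ===== VERDICT (by name: the statement is the Claim_ definition above) =====
theorem calcuateTime_spec : Claim_equal_calcuateTime := by
  intro prepares k _ hpre
  obtain ⟨hk1, hk2⟩ := hpre
  unfold Spec_calcuateTime calcuateTime calcuateTime_alt
  have hk0 : (0 : Int) ≤ k := by omega
  have hlen : k.toNat ≤ prepares.length := by omega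
  rw [aInit_eq k.toNat [] prepares hlen, PySem.List.slice_to _ hk0, PySem.List.slice_from _ hk0]
  set tk := prepares.take k.toNat with htk
  set dk := prepares.drop k.toNat with hdk
  have htkne : tk ≠ [] := by
    rw [htk, ne_eq, List.take_eq_nil_iff]
    push Not
    refine ⟨by omega, fun h => ?_⟩
    rw [h] at hlen; simp at hlen; omega
  have hperm0 : (tk.foldl (fun l j => insB j l) []).Perm tk := by simpa using insFold_perm tk []
  have hsorted0 : (tk.foldl (fun l j => insB j l) []).Pairwise (· ≤ ·) :=
    insFold_pairwise tk [] (by simp)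
  obtain ⟨st, loads', h1, h2, h3, h4, h5⟩ :=
    main_loop dk tk (tk.foldl (fun l j => insB j l) []) htkne hperm0 hsorted0
  rw [foldl_insertB_eq tk [] (by simp), foldl_step_insertB_eq dk _ hsorted0]
  show ((match aWhile tk dk with
    | none => (0 : Int)
    | some st =>
      match PySem.List.sorted st (fun x => x) true with
      | [] => (0 : Int)
      | m :: _ => m) : Int) = _
  rw [h1, h2]
  show ((match PySem.List.sorted st (fun x => x) true with
    | [] => (0 : Int)
    | m :: _ => m) : Int) = _
  have hstne : st ≠ [] := by
    intro h
    rw [h] at h3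
    exact h5 h3.eq_nil
  cases hs : PySem.List.sorted st (fun x => x) true with
  | nil => exact absurd ((PySem.List.sorted_eq_nil_iff st (fun x => x) true).mp hs) hstne
  | cons m tl =>
    show m = PySem.List.pyGetD loads' (-1) 0
    rw [PySem.List.pyGetD_neg_one loads' 0 h5]
    have hmax_a : ∀ y ∈ st, y ≤ m := PySem.List.key_head_sorted_rev_ge st (fun x => x) hs
    have hm_mem : m ∈ st := by
      have hmem : m ∈ PySem.List.sorted st (fun x => x) true := by rw [hs]; simp
      exact (PySem.List.sorted_perm st (fun x => x) true).mem_iff.mp hmem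
    have hmax_b : ∀ y ∈ loads', y ≤ loads'.getLast h5 := getLast_max loads' h4 h5
    have h_ab : m ≤ loads'.getLast h5 := hmax_b m (h3.symm.mem_iff.mp hm_mem)
    have h_ba : loads'.getLast h5 ≤ m := hmax_a _ (h3.mem_iff.mp (List.getLast_mem h5))
    omega
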